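-- pv_equiv track=rewrite | github.com/mooilicht/coding-test | programmers/Level_1/42840.py | solution
-- ===== SOURCE A (Python) =====
-- def solution(answers):
--     answer1 = [1, 2, 3, 4, 5]
--     answer2 = [2, 1, 2, 3, 2, 4, 2, 5]
--     answer3 = [3, 3, 1, 1, 2, 2, 4, 4, 5, 5]
--     count = [0, 0, 0]
--
--     while len(answers) > len(answer1):
--         answer1 += answer1
--
--     while len(answers) > len(answer2):
--         answer2 += answer2
--
--     while len(answers) > len(answer3):
--         answer3 += answer3
--
--     for i in range(len(answers)):
--         if answers[i] == answer1[i]: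
--             count[0] += 1
--         if answers[i] == answer2[i]:
--             count[1] += 1
--         if answers[i] == answer3[i]:
--             count[2] += 1
--
--     answer = []
--     for i in range(len(count)):
--         if max(count) == count[i]:
--             answer.append(i+1)
--     return answer
-- ===== SOURCE B (Python) =====
-- def solution(answers):
--     patterns = [[1, 2, 3, 4, 5],
--                 [2, 1, 2, 3, 2, 4, 2, 5],
--                 [3, 3, 1, 1, 2, 2, 4, 4, 5, 5]]
--     # transpose the scan: for each pattern phase r, every position r, r+m, r+2m, ...
--     # must show p[r]; count those hits with list.count on the strided slice.
--     scores = [sum(answers[r::len(p)].count(v) for r, v in enumerate(p))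
--               for p in patterns]
--     best = max(scores)
--     return [k + 1 for k, s in enumerate(scores) if s == best]
-- ===== Notes on version B (the rewrite author's own statement) =====
-- stated objective: alternative
-- what changed: B inverts the traversal: instead of A's table-building phase (three doubling while-loops) followed by one indexed pass comparing answers[i] to each extended table, B loops over the pattern phases and, for each phase r, counts occurrences of the phase value in the strided slice answers[r::period] with list.count, then sums the per-phase counts.
import Mathlib
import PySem

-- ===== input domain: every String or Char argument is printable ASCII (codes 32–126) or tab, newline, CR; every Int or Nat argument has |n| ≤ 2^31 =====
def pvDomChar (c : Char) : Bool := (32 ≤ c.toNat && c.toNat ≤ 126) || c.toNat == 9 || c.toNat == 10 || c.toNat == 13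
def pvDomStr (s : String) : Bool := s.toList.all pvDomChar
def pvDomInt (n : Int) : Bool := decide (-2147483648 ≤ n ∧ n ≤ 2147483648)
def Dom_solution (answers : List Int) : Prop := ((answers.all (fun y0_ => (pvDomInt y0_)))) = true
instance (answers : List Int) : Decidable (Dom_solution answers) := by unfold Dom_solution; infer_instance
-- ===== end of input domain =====

-- B transposes the scan: instead of extending the pattern tables and comparing position by
-- position, it counts, for each pattern phase r, the occurrences of the phase value in the
-- strided slice answers[r::period] with list.count; objective: alternative decomposition.

-- ===== PORT A =====
-- 'while len(answers) > len(xs): xs += xs'; the 'xs ≠ []' conjunct is only a totality guard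
-- (every call site passes a nonempty literal, on which it never fires).
def extendA (n : Int) (xs : List Int) : List Int :=
  if h : (xs.length : Int) < n ∧ xs ≠ [] then extendA n (xs ++ xs) else xs
termination_by (n - xs.length).toNat
decreasing_by
  simp only [List.length_append]
  have : 1 ≤ xs.length := List.length_pos_iff.mpr h.2
  omega

-- the body of A's counting for-loop (three independent ifs, in order)
def stepA (answers a1 a2 a3 : List Int) (c : Int × Int × Int) (i : Int) : Int × Int × Int :=
  let c := if PySem.List.pyGetD answers i 0 = PySem.List.pyGetD a1 i 0 then (c.1 + 1, c.2.1, c.2.2) else c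
  let c := if PySem.List.pyGetD answers i 0 = PySem.List.pyGetD a2 i 0 then (c.1, c.2.1 + 1, c.2.2) else c
  if PySem.List.pyGetD answers i 0 = PySem.List.pyGetD a3 i 0 then (c.1, c.2.1, c.2.2 + 1) else c

def solution (answers : List Int) : List Int :=
  let n : Int := answers.length
  let a1 := extendA n [1, 2, 3, 4, 5]
  let a2 := extendA n [2, 1, 2, 3, 2, 4, 2, 5]
  let a3 := extendA n [3, 3, 1, 1, 2, 2, 4, 4, 5, 5]
  let count := (PySem.List.pyRange 0 n 1).foldl (stepA answers a1 a2 a3) (0, 0, 0)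
  let cnt : List Int := [count.1, count.2.1, count.2.2]
  (PySem.List.pyRange 0 3 1).foldl (fun acc i =>
    if PySem.List.max? cnt (fun y => y) = some (PySem.List.pyGetD cnt i 0) then acc ++ [i + 1] else acc) []

-- ===== PORT B =====
-- answers[r::m]; the step m is a positive literal at every call site, so slice? is never none
def strideB (xs : List Int) (r : Int) (m : Int) : List Int :=
  (PySem.List.slice? xs (some r) none m).getD []

-- sum(answers[r::len(p)].count(v) for r, v in enumerate(p))
def scoreB (xs : List Int) (p : List Int) : Int :=
  ((PySem.List.enumerate p).map
    (fun rv => (PySem.List.count (strideB xs rv.1 (p.length : Int)) rv.2 : Int))).sum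

def solution_alt (answers : List Int) : List Int :=
  let patterns : List (List Int) :=
    [[1, 2, 3, 4, 5], [2, 1, 2, 3, 2, 4, 2, 5], [3, 3, 1, 1, 2, 2, 4, 4, 5, 5]]
  let scores := patterns.map (scoreB answers)
  -- max(scores): scores is a nonempty 3-element list, so max? is some
  let best := (PySem.List.max? scores (fun y => y)).getD 0
  (PySem.List.enumerate scores).foldl
    (fun acc ks => if ks.2 = best then acc ++ [ks.1 + 1] else acc) []

-- ===== PRECONDITION & SPEC =====
def Spec_solution (answers : List Int) (out : List Int) : Prop := out = solution_alt answers
instance (answers : List Int) (out : List Int) : Decidable (Spec_solution answers out) := by unfold Spec_solution; infer_instance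

-- ===== CLAIM (what is proved, stated in full; the proofs are below) =====
def Claim_equal_solution : Prop := ∀ (answers : List Int), Dom_solution answers → Spec_solution answers (solution answers)

-- ===== LEMMAS AND PROOFS =====

-- the shared characterization both counting phases are reduced to
def matchQ (xs p : List Int) (i : Nat) : Bool :=
  decide (xs.getD i 0 = p.getD (i % p.length) 0)

-- the doubled table stays periodic with period p.length and ends at least n long
theorem extendA_spec (n : Int) (p xs : List Int)
    (hmod : xs.length % p.length = 0) (hpos : 0 < xs.length)
    (hper : ∀ i : Nat, i < xs.length → xs.getD i 0 = p.getD (i % p.length) 0) :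
    (n ≤ ((extendA n xs).length : Int)) ∧
    ∀ i : Nat, i < (extendA n xs).length → (extendA n xs).getD i 0 = p.getD (i % p.length) 0 := by
  fun_induction extendA n xs with
  | case1 xs h ih =>
    apply ih
    · rw [List.length_append, Nat.add_mod, hmod]; simp
    · simp only [List.length_append]; omega
    · intro i hi
      simp only [List.length_append] at hi
      by_cases hlt : i < xs.length
      · rw [List.getD_append _ _ _ _ hlt]; exact hper i hlt
      · have h2 : i - xs.length < xs.length := by omega
        rw [List.getD_append_right _ _ _ _ (by omega)]
        rw [hper _ h2]
        congr 1
        obtain ⟨k, hk⟩ := Nat.dvd_of_mod_eq_zero hmod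
        have hp0 : p.length ≠ 0 := by rintro h0; rw [h0] at hk; omega
        conv_rhs => rw [show i = (i - xs.length) + xs.length by omega]
        rw [hk]; rw [Nat.mul_comm]; exact (Nat.add_mul_mod_self_right _ k p.length).symm
  | case2 xs h =>
    rw [not_and_or] at h
    refine ⟨?_, hper⟩
    have hne : xs ≠ [] := by rintro rfl; simp at hpos
    rcases h with h | h
    · omega
    · exact absurd h (by simp [hne])

-- table lookup in the extended list = pattern lookup with modulo, for in-range indices
theorem table_lookup (n : Int) (p : List Int) (hp : p ≠ []) (i : Int)
    (h0 : 0 ≤ i) (hn : i < n) :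
    PySem.List.pyGetD (extendA n p) i 0 = PySem.List.pyGetD p (i % (p.length : Int)) 0 := by
  obtain ⟨hlen, hper⟩ := extendA_spec n p p (Nat.mod_self _) (List.length_pos_iff.mpr hp)
    (fun i hi => by rw [Nat.mod_eq_of_lt hi])
  obtain ⟨m, rfl⟩ := Int.eq_ofNat_of_zero_le h0
  have hm : m < (extendA n p).length := by omega
  rw [show ((m : Int) % (p.length : Int)) = ((m % p.length : Nat) : Int) by push_cast; ring]
  rw [PySem.List.pyGetD_natCast, PySem.List.pyGetD_natCast]
  exact hper m hm

-- A's triple-state fold is three independent counting folds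
theorem foldA_split (xs a1 a2 a3 : List Int) (l : List Int) (c : Int × Int × Int) :
    l.foldl (stepA xs a1 a2 a3) c =
    (l.foldl (fun acc i => if PySem.List.pyGetD xs i 0 = PySem.List.pyGetD a1 i 0 then acc + 1 else acc) c.1,
     l.foldl (fun acc i => if PySem.List.pyGetD xs i 0 = PySem.List.pyGetD a2 i 0 then acc + 1 else acc) c.2.1,
     l.foldl (fun acc i => if PySem.List.pyGetD xs i 0 = PySem.List.pyGetD a3 i 0 then acc + 1 else acc) c.2.2) := by
  induction l generalizing c with
  | nil => rfl
  | cons x t ih =>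
    simp only [List.foldl_cons, ih, stepA]
    split_ifs <;> rfl

-- one component of A's count = countP of the shared characterization
theorem countA_eq (xs p : List Int) (hp : p ≠ []) :
    (PySem.List.pyRange 0 (xs.length : Int) 1).foldl
      (fun acc i => if PySem.List.pyGetD xs i 0 = PySem.List.pyGetD (extendA xs.length p) i 0 then acc + 1 else acc) 0 =
    (((List.range xs.length).countP (matchQ xs p) : Nat) : Int) := by
  rw [PySem.List.foldl_ite_add_one
    (fun i => PySem.List.pyGetD xs i 0 = PySem.List.pyGetD (extendA xs.length p) i 0)]
  rw [PySem.List.pyRange_one]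
  simp only [sub_zero, Int.toNat_natCast, zero_add]
  rw [List.countP_map]
  congr 1
  apply List.countP_congr
  intro k hk
  rw [List.mem_range] at hk
  simp only [Function.comp_apply]
  rw [table_lookup _ p hp (k : Int) (by positivity) (by exact_mod_cast hk)]
  rw [show ((k : Int) % (p.length : Int)) = ((k % p.length : Nat) : Int) by push_cast; ring]
  rw [PySem.List.pyGetD_natCast, PySem.List.pyGetD_natCast]
  unfold matchQ
  rfl

-- answers[r::m] lists exactly the entries at positions r, r+m, r+2m, …
theorem stride_eq (xs : List Int) (r m : Nat) (hm : 0 < m) :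
    strideB xs (r : Int) (m : Int) =
    (List.range ((xs.length - r + m - 1) / m)).map (fun k => xs.getD (r + m * k) 0) := by
  unfold strideB PySem.List.slice? PySem.List.sliceIndices
  have hm0 : ¬ ((m : Int) = 0) := by omega
  have hmneg : ¬ ((m : Int) < 0) := by omega
  have hr0 : ¬ ((r : Int) < 0) := by omega
  simp only [hm0, hmneg, hr0, if_false, if_neg, reduceIte]
  by_cases hrn : xs.length ≤ r
  · have h1 : min (r : Int) (xs.length : Int) = (xs.length : Int) := by omega
    rw [h1]
    simp only [lt_irrefl, if_false, reduceIte]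
    have : (xs.length - r + m - 1) / m = 0 := by
      have : xs.length - r = 0 := by omega
      rw [this]
      exact Nat.div_eq_of_lt (by omega)
    rw [this]
    simp [show (0:Int) < (m:Int) from by omega]
  · push_neg at hrn
    have h1 : min (r : Int) (xs.length : Int) = (r : Int) := by omega
    rw [h1]
    have h2 : ((r : Int) < (xs.length : Int)) := by exact_mod_cast hrn
    rw [if_pos (by omega : (0:Int) < (m:Int)), if_pos h2]
    have hK : (((xs.length : Int) - r + m - 1) / m).toNat = (xs.length - r + m - 1) / m := by
      rw [show ((xs.length : Int) - r + m - 1) = ((xs.length - r + m - 1 : Nat) : Int) from by omega]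
      rw [← Int.natCast_div]
      exact Int.toNat_natCast _
    rw [hK]
    simp only [Option.getD_some]
    apply List.filterMap_eq_map_iff_forall_eq_some.mpr
    intro k hk
    rw [List.mem_range] at hk
    have hkm : (k + 1) * m ≤ xs.length - r + m - 1 := (Nat.le_div_iff_mul_le hm).mp hk
    have hlin : k * m + m = (k + 1) * m := by ring
    have hcomm : m * k = k * m := Nat.mul_comm _ _
    have hidx : r + m * k < xs.length := by omega
    have : ((r : Int) + (m : Int) * (k : Int)).toNat = r + m * k := by
      rw [show ((r : Int) + (m : Int) * (k : Int)) = ((r + m * k : Nat) : Int) by push_cast; ring]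
      exact Int.toNat_natCast _
    rw [this, List.getElem?_eq_getElem hidx, List.getD_eq_getElem _ _ hidx]


-- countP over List.range as a Finset sum
theorem countP_range_sum (t : Nat) (q : Nat → Bool) :
    (List.range t).countP q = ∑ i ∈ Finset.range t, (if q i then 1 else 0) := by
  induction t with
  | zero => rfl
  | succ t ih =>
    rw [List.range_succ, List.countP_append, Finset.sum_range_succ, ih]
    simp [List.countP_cons]

-- the phase decomposition: summing the per-phase hit counts over all phases
-- counts every position exactly once (the bijection i ↦ (i % m, i / m))
theorem stride_count_total (n m : Nat) (hm : 0 < m) (q : Nat → Bool) :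
    ∑ r ∈ Finset.range m, (List.range ((n - r + m - 1) / m)).countP (fun k => q (r + m * k)) =
    (List.range n).countP q := by
  simp only [countP_range_sum]
  rw [Finset.sum_sigma']
  apply Finset.sum_nbij' (i := fun a => a.1 + m * a.2) (j := fun i => ⟨i % m, i / m⟩)
  · rintro ⟨r, k⟩ ha
    rw [Finset.mem_sigma, Finset.mem_range, Finset.mem_range] at ha
    rw [Finset.mem_range]
    obtain ⟨hr, hk⟩ := ha
    show r + m * k < n
    by_cases hrn : n ≤ r
    · exfalso
      have h0 : n - r = 0 := by omega
      rw [h0] at hk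
      have : (0 + m - 1) / m = 0 := Nat.div_eq_of_lt (by omega)
      omega
    · push_neg at hrn
      have h2 : (k + 1) * m ≤ n - r + m - 1 := (Nat.le_div_iff_mul_le hm).mp hk
      have h3 : k * m + m = (k + 1) * m := by ring
      have h4 : m * k = k * m := Nat.mul_comm _ _
      omega
  · intro i hi
    rw [Finset.mem_range] at hi
    rw [Finset.mem_sigma, Finset.mem_range, Finset.mem_range]
    refine ⟨Nat.mod_lt _ hm, ?_⟩
    show i / m < (n - i % m + m - 1) / m
    rw [Nat.lt_iff_add_one_le]
    apply (Nat.le_div_iff_mul_le hm).mpr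
    rw [show (i / m + 1) * m = (i / m) * m + m from by ring]
    have h0 : i % m + m * (i / m) = i := Nat.mod_add_div i m
    have h4 : m * (i / m) = (i / m) * m := Nat.mul_comm _ _
    have hmod : i % m ≤ i := Nat.mod_le _ _
    omega
  · rintro ⟨r, k⟩ ha
    rw [Finset.mem_sigma, Finset.mem_range, Finset.mem_range] at ha
    have h1 : (r + m * k) % m = r := by
      rw [Nat.add_mul_mod_self_left, Nat.mod_eq_of_lt ha.1]
    have h2 : (r + m * k) / m = k := by
      rw [Nat.mul_comm m k, Nat.add_mul_div_right _ _ hm, Nat.div_eq_of_lt ha.1, Nat.zero_add]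
    simp [Sigma.mk.injEq, h1, h2]
  · intro i hi
    exact Nat.mod_add_div i m
  · rintro ⟨r, k⟩ ha
    rfl

-- sum over List.range as a Finset sum
theorem sum_map_range (t : Nat) (f : Nat → Int) :
    ((List.range t).map f).sum = ∑ i ∈ Finset.range t, f i := by
  induction t with
  | zero => rfl
  | succ t ih =>
    rw [List.range_succ, List.map_append, List.sum_append, Finset.sum_range_succ, ih]
    simp

-- B's per-pattern score = countP of the shared characterization
theorem scoreB_eq (xs p : List Int) (hp : p ≠ []) :
    scoreB xs p = (((List.range xs.length).countP (matchQ xs p) : Nat) : Int) := by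
  have hm : 0 < p.length := List.length_pos_iff.mpr hp
  unfold scoreB
  rw [PySem.List.enumerate_eq_map_pyRange (d := 0), List.map_map]
  rw [PySem.List.pyRange_one]
  simp only [sub_zero, Int.toNat_natCast, PySem.List.len_eq, List.map_map, zero_add]
  rw [sum_map_range]
  rw [← stride_count_total xs.length p.length hm (matchQ xs p)]
  rw [Nat.cast_sum]
  apply Finset.sum_congr rfl
  intro r hr
  rw [Finset.mem_range] at hr
  simp only [Function.comp_apply]
  rw [stride_eq xs r p.length hm]
  rw [PySem.List.count_eq, List.count_eq_countP, List.countP_map]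
  congr 1
  apply List.countP_congr
  intro k _
  simp only [Function.comp_apply]
  rw [Bool.eq_iff_iff]
  simp [matchQ, beq_iff_eq, PySem.List.pyGetD_natCast, Nat.add_mul_mod_self_left,
    Nat.mod_eq_of_lt hr]

-- the two selection phases agree
theorem sel_eq (x y z : Int) :
    (PySem.List.pyRange 0 3 1).foldl (fun acc i =>
      if PySem.List.max? [x, y, z] (fun y => y) = some (PySem.List.pyGetD [x, y, z] i 0)
      then acc ++ [i + 1] else acc) [] =
    (PySem.List.enumerate [x, y, z]).foldl (fun acc ks =>
      if ks.2 = (PySem.List.max? [x, y, z] (fun y => y)).getD 0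
      then acc ++ [ks.1 + 1] else acc) [] := by
  rw [show PySem.List.pyRange 0 3 1 = [0, 1, 2] from by decide]
  simp only [PySem.List.enumerate_cons, PySem.List.enumerate_nil]
  norm_num
  simp only [List.foldl, PySem.List.max?_id_cons]
  rw [PySem.List.pyGetD_ofNat' [x, y, z] 1, PySem.List.pyGetD_ofNat' [x, y, z] 2]
  simp only [List.getD, List.getElem?_cons_zero, List.getElem?_cons_succ, Option.getD_some,
    Option.some.injEq]
  set M := max (max x y) z with hM
  split_ifs <;> first | rfl | (exfalso; omega)

set_option maxHeartbeats 1000000 in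
theorem solution_eq (answers : List Int) : solution answers = solution_alt answers := by
  simp only [solution, solution_alt, List.map_cons, List.map_nil]
  rw [foldA_split]
  dsimp only
  rw [countA_eq answers [1, 2, 3, 4, 5] (by simp),
      countA_eq answers [2, 1, 2, 3, 2, 4, 2, 5] (by simp),
      countA_eq answers [3, 3, 1, 1, 2, 2, 4, 4, 5, 5] (by simp)]
  have h1 := scoreB_eq answers [1, 2, 3, 4, 5] (by simp)
  have h2 := scoreB_eq answers [2, 1, 2, 3, 2, 4, 2, 5] (by simp)
  have h3 := scoreB_eq answers [3, 3, 1, 1, 2, 2, 4, 4, 5, 5] (by simp)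
  simp only [h1, h2, h3]
  exact sel_eq _ _ _

-- ===== VERDICT (by name: the statement is the Claim_ definition above) =====
theorem solution_spec : Claim_equal_solution := by
  intro answers _
  unfold Spec_solution
  exact solution_eq answers
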